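-- pv_equiv track=rewrite | github.com/plasticfist/thefremen | plugin.py | LFSRDigest8
-- ===== SOURCE A (Python) =====
-- def LFSRDigest8(message, bytes, gen, key):
--     sum = 0
--     for k in range(0, bytes):
--         data = message[k]
--         for i in range (7,-1, -1):
--             # fprintf(stderr, "key is %02x\n", key);
--             # XOR key into sum if data bit is set
--             if (data >> i) & 1:
--                 sum ^= key
--
--             # roll the key right (actually the lsb is dropped here)
--             # and apply the gen (needs to include the dropped lsb as msb)
--             if key & 1:
--                 key = (key >> 1) ^ gen
--             else:
--                 key = (key >> 1)
--     return sum
-- ===== SOURCE B (Python) =====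
-- def LFSRDigest8(message, bytes, gen, key):
--     # Pass 1: precompute the LFSR key stream (state BEFORE each advance).
--     n = 8 * max(bytes, 0)
--     states = []
--     k = key
--     for _ in range(n):
--         states.append(k)
--         k = (k >> 1) ^ gen if k & 1 else (k >> 1)
--     # Pass 2: XOR the matching key state for every set data bit.
--     s = 0
--     for kb in range(bytes):
--         data = message[kb]
--         for i in range(8):
--             if (data >> (7 - i)) & 1:
--                 s ^= states[kb * 8 + i]
--     return s
-- ===== Notes on version B (the rewrite author's own statement) =====
-- stated objective: alternative
-- what changed: B splits A's single interleaved loop into two passes: it first materialises the LFSR key stream (the key state before each of the 8*bytes advances) into a list, then a separately shaped bit loop XORs the indexed key states into the sum for each set data bit.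
import Mathlib
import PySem

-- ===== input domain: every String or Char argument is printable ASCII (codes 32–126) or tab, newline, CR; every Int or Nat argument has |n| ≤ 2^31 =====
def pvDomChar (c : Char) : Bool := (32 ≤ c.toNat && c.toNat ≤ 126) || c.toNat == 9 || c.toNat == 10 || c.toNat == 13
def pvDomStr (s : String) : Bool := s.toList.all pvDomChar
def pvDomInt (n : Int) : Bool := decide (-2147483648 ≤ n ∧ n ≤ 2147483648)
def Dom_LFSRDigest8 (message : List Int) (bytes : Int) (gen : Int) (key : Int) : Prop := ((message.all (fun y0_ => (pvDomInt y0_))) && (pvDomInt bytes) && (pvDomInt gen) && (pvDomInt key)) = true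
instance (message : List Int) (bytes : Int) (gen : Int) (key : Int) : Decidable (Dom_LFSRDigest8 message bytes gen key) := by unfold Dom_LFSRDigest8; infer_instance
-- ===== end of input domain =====

-- B replaces A's single interleaved loop by two passes (a precomputed LFSR key-stream list,
-- then a separately shaped index-based bit loop); objective: alternative decomposition, same cost.

-- ===== PORT A =====
def LFSRDigest8 (message : List Int) (bytes : Int) (gen : Int) (key : Int) : Int :=
  ((PySem.List.pyRange 0 bytes 1).foldl (fun (st : Int × Int) k =>
    let data := PySem.List.pyGetD message k 0
    (PySem.List.pyRange 7 (-1) (-1)).foldl (fun (st : Int × Int) i =>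
      let sum := if PySem.Int.band (data >>> i.toNat) 1 ≠ 0 then PySem.Int.bxor st.1 st.2 else st.1
      let key := if PySem.Int.band st.2 1 ≠ 0 then PySem.Int.bxor (st.2 >>> 1) gen else st.2 >>> 1
      (sum, key)) st) ((0 : Int), key)).1

-- ===== PORT B =====
-- Source B's pass 1, 'for _ in range(n): states.append(k); k = step(k)', as structural recursion on n
def pvKeyStream (gen : Int) : Nat → Int → List Int
  | 0, _ => []
  | n+1, k => k :: pvKeyStream gen n (if PySem.Int.band k 1 ≠ 0 then PySem.Int.bxor (k >>> 1) gen else k >>> 1)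

def LFSRDigest8_alt (message : List Int) (bytes : Int) (gen : Int) (key : Int) : Int :=
  let states := pvKeyStream gen (8 * max bytes 0).toNat key
  (PySem.List.pyRange 0 bytes 1).foldl (fun (s : Int) kb =>
    let data := PySem.List.pyGetD message kb 0
    (PySem.List.pyRange 0 8 1).foldl (fun (s : Int) i =>
      if PySem.Int.band (data >>> (7 - i).toNat) 1 ≠ 0
      then PySem.Int.bxor s (PySem.List.pyGetD states (kb * 8 + i) 0) else s) s) 0

-- ===== PRECONDITION & SPEC =====
-- Pre_ excludes exactly the inputs on which A raises IndexError: message[k] with bytes > len(message).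
def Pre_LFSRDigest8 (message : List Int) (bytes : Int) (gen : Int) (key : Int) : Prop :=
  bytes ≤ (message.length : Int)
instance (message : List Int) (bytes : Int) (gen : Int) (key : Int) : Decidable (Pre_LFSRDigest8 message bytes gen key) := by unfold Pre_LFSRDigest8; infer_instance
def pvWitness_LFSRDigest8 : List Int × Int × Int × Int := ([83, 7], 2, 140, 255)

def Spec_LFSRDigest8 (message : List Int) (bytes : Int) (gen : Int) (key : Int) (out : Int) : Prop := out = LFSRDigest8_alt message bytes gen key
instance (message : List Int) (bytes : Int) (gen : Int) (key : Int) (out : Int) : Decidable (Spec_LFSRDigest8 message bytes gen key out) := by unfold Spec_LFSRDigest8; infer_instance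

-- ===== CLAIM (what is proved, stated in full; the proofs are below) =====
def Claim_equal_LFSRDigest8 : Prop := ∀ (message : List Int) (bytes : Int) (gen : Int) (key : Int), Dom_LFSRDigest8 message bytes gen key → Pre_LFSRDigest8 message bytes gen key → Spec_LFSRDigest8 message bytes gen key (LFSRDigest8 message bytes gen key)

-- ===== LEMMAS AND PROOFS =====

-- one LFSR advance, and its n-fold iterate
def pvStep (gen k : Int) : Int :=
  if PySem.Int.band k 1 ≠ 0 then PySem.Int.bxor (k >>> 1) gen else k >>> 1

def pvIter (gen : Int) : Nat → Int → Int
  | 0, k => k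
  | n+1, k => pvIter gen n (pvStep gen k)

lemma pvIter_add (gen : Int) (m n : Nat) (k : Int) :
    pvIter gen (m + n) k = pvIter gen n (pvIter gen m k) := by
  induction m generalizing k with
  | zero => rw [Nat.zero_add]; rfl
  | succ m ih =>
      have h : m + 1 + n = (m + n) + 1 := by omega
      rw [h]
      show pvIter gen (m + n) (pvStep gen k) = pvIter gen n (pvIter gen m (pvStep gen k))
      exact ih (pvStep gen k)

-- the key stream holds the iterates of the initial key
lemma ks_getD (gen key : Int) (N j : Nat) (h : j < N) :
    (pvKeyStream gen N key).getD j 0 = pvIter gen j key := by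
  induction N generalizing j key with
  | zero => omega
  | succ N ih =>
      cases j with
      | zero => rfl
      | succ j =>
          show (pvKeyStream gen N (pvStep gen key)).getD j 0 = _
          rw [ih _ _ (by omega)]
          rfl

-- one byte of A's interleaved loop equals B's bit loop phrased with pvIter (definitional)
lemma inner_eq (gen data s ky : Int) :
    (PySem.List.pyRange 7 (-1) (-1)).foldl (fun (st : Int × Int) i =>
      let sum := if PySem.Int.band (data >>> i.toNat) 1 ≠ 0 then PySem.Int.bxor st.1 st.2 else st.1
      let key := if PySem.Int.band st.2 1 ≠ 0 then PySem.Int.bxor (st.2 >>> 1) gen else st.2 >>> 1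
      (sum, key)) (s, ky)
    = ((PySem.List.pyRange 0 8 1).foldl (fun (s : Int) i =>
        if PySem.Int.band (data >>> (7 - i).toNat) 1 ≠ 0
        then PySem.Int.bxor s (pvIter gen i.toNat ky) else s) s,
       pvIter gen 8 ky) := by rfl

-- B's bit loop with key-stream lookups equals the pvIter phrasing, for byte kb with 8*kb+8 ≤ N
lemma lookup_eq (gen key data s : Int) (N kb : Nat) (hk : 8*kb + 8 ≤ N) :
    (PySem.List.pyRange 0 8 1).foldl (fun (s : Int) i =>
      if PySem.Int.band (data >>> (7 - i).toNat) 1 ≠ 0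
      then PySem.Int.bxor s (PySem.List.pyGetD (pvKeyStream gen N key) ((kb : Int) * 8 + i) 0) else s) s
    = (PySem.List.pyRange 0 8 1).foldl (fun (s : Int) i =>
        if PySem.Int.band (data >>> (7 - i).toNat) 1 ≠ 0
        then PySem.Int.bxor s (pvIter gen i.toNat (pvIter gen (8*kb) key)) else s) s := by
  have look : ∀ c : Nat, c < 8 → PySem.List.pyGetD (pvKeyStream gen N key) ((kb:Int)*8 + (c:Int)) 0
      = pvIter gen c (pvIter gen (8*kb) key) := by
    intro c hc
    have h1 : ((kb:Int)*8 + (c:Int)) = ((8*kb + c : Nat) : Int) := by push_cast; ring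
    rw [h1, PySem.List.pyGetD_natCast, ks_getD gen key N (8*kb+c) (by omega), pvIter_add]
  have l0 := look 0 (by omega); have l1 := look 1 (by omega); have l2 := look 2 (by omega)
  have l3 := look 3 (by omega); have l4 := look 4 (by omega); have l5 := look 5 (by omega)
  have l6 := look 6 (by omega); have l7 := look 7 (by omega)
  norm_num at l0 l1 l2 l3 l4 l5 l6 l7
  have h8 : PySem.List.pyRange 0 8 1 = [0,1,2,3,4,5,6,7] := by decide
  rw [h8]
  simp only [List.foldl_cons, List.foldl_nil]
  norm_num [l0, l1, l2, l3, l4, l5, l6, l7]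
  rfl

-- the main loop invariant: A's state after n bytes = (B's sum after n bytes, 8n-fold advanced key)
lemma loop_eq (message : List Int) (gen key : Int) (N : Nat) (n : Nat) (hN : 8*n ≤ N) :
    (List.range n).foldl (fun (st : Int × Int) (k : Nat) =>
      let data := PySem.List.pyGetD message (k : Int) 0
      (PySem.List.pyRange 7 (-1) (-1)).foldl (fun (st : Int × Int) i =>
        let sum := if PySem.Int.band (data >>> i.toNat) 1 ≠ 0 then PySem.Int.bxor st.1 st.2 else st.1
        let key := if PySem.Int.band st.2 1 ≠ 0 then PySem.Int.bxor (st.2 >>> 1) gen else st.2 >>> 1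
        (sum, key)) st) ((0 : Int), key)
    = ((List.range n).foldl (fun (s : Int) (kb : Nat) =>
        let data := PySem.List.pyGetD message (kb : Int) 0
        (PySem.List.pyRange 0 8 1).foldl (fun (s : Int) i =>
          if PySem.Int.band (data >>> (7 - i).toNat) 1 ≠ 0
          then PySem.Int.bxor s (PySem.List.pyGetD (pvKeyStream gen N key) ((kb : Int) * 8 + i) 0) else s) s) 0,
       pvIter gen (8*n) key) := by
  induction n with
  | zero => rfl
  | succ n ih =>
      rw [List.range_succ, List.foldl_append, List.foldl_append, ih (by omega)]
      simp only [List.foldl_cons, List.foldl_nil]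
      rw [inner_eq, lookup_eq gen key _ _ N n (by omega)]
      rw [show pvIter gen 8 (pvIter gen (8*n) key) = pvIter gen (8*(n+1)) key by
        rw [← pvIter_add, show (8:Nat)*n + 8 = 8*(n+1) from by omega]]

-- ===== VERDICT (by name: the statement is the Claim_ definition above) =====
theorem LFSRDigest8_spec : Claim_equal_LFSRDigest8 := by
  intro message bytes gen key _ _
  unfold Spec_LFSRDigest8 LFSRDigest8 LFSRDigest8_alt
  have hr : PySem.List.pyRange 0 bytes 1 = (List.range bytes.toNat).map (Nat.cast : Nat → Int) := by
    rw [PySem.List.pyRange_one]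
    simp only [sub_zero, zero_add]
  have hN : (8 * max bytes 0).toNat = 8 * bytes.toNat := by omega
  rw [hr, hN, List.foldl_map, List.foldl_map]
  exact congrArg Prod.fst (loop_eq message gen key (8 * bytes.toNat) bytes.toNat (by omega))
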